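-- pv_equiv track=rewrite | github.com/amansbu126/My-Learning | Python/Hands On/day_27.py | Isogram_Check
-- ===== SOURCE A (Python) =====
-- def Isogram_Check(s):
--     # Code here
--     val1=''
--     val2=''
--     res=0
--     for i in range(len(s)):
--         val1=s[i]
--         for j in range(i+1,len(s)):
--             val2=s[j]
--             if val1==val2:
--                 res+=1
--     if res==1:
--         return 0
--     else:
--         return 1
-- ===== SOURCE B (Python) =====
-- def Isogram_Check(s):
--     seen = {}
--     res = 0
--     for ch in s:
--         c = seen.get(ch, 0)
--         res += c
--         seen[ch] = c + 1
--     return 0 if res == 1 else 1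
-- ===== Notes on version B (the rewrite author's own statement) =====
-- stated objective: faster
-- what changed: Replaces the O(n^2) all-pairs double loop with a single pass that keeps a per-character running count in a dict and adds the count of earlier occurrences at each position.
import Mathlib
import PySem

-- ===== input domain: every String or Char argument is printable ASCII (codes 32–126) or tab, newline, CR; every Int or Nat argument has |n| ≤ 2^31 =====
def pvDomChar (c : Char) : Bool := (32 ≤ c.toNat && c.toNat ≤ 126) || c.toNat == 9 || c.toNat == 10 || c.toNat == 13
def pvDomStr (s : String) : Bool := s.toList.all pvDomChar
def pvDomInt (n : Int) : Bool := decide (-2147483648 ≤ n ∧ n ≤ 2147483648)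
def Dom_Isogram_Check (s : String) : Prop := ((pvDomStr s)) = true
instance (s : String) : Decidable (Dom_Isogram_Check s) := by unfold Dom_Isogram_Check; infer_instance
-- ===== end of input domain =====

-- B replaces A's O(n^2) all-pairs double loop by a single pass with a running per-character count in a dict.

-- ===== PORT A =====
-- Python's val1/val2 start as '' and are only read after being assigned a character;
-- ported with the placeholder ' ' for those initial (never-compared) values.
def Isogram_Check (s : String) : Int :=
  let cs := s.toList
  let st := (PySem.List.pyRange 0 (PySem.Str.len s) 1).foldl
    (fun (st : Char × Char × Int) i =>
      let val1 := PySem.List.pyGetD cs i ' '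
      let inner := (PySem.List.pyRange (i + 1) (PySem.Str.len s) 1).foldl
        (fun (st2 : Char × Int) j =>
          let val2 := PySem.List.pyGetD cs j ' '
          if val1 == val2 then (val2, st2.2 + 1) else (val2, st2.2))
        (st.2.1, st.2.2)
      (val1, inner))
    (' ', ' ', 0)
  if st.2.2 = 1 then 0 else 1

-- ===== PORT B =====
def Isogram_Check_alt (s : String) : Int :=
  let st := s.toList.foldl
    (fun (st : PySem.Dict Char Int × Int) ch =>
      let c := st.1.getD ch 0
      (st.1.insert ch (c + 1), st.2 + c))
    (PySem.Dict.empty, 0)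
  if st.2 = 1 then 0 else 1

-- ===== PRECONDITION & SPEC =====
def Spec_Isogram_Check (s : String) (out : Int) : Prop := out = Isogram_Check_alt s
instance (s : String) (out : Int) : Decidable (Spec_Isogram_Check s out) := by unfold Spec_Isogram_Check; infer_instance

-- ===== CLAIM (what is proved, stated in full; the proofs are below) =====
def Claim_equal_Isogram_Check : Prop := ∀ (s : String), Dom_Isogram_Check s → Spec_Isogram_Check s (Isogram_Check s)

-- ===== LEMMAS AND PROOFS =====

/-- Number of pairs i < j with equal characters, by structural recursion. -/
def pvPairs : List Char → Int
  | [] => 0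
  | x :: t => (t.count x : Int) + pvPairs t

theorem pvPairs_append_singleton (p : List Char) (c : Char) :
    pvPairs (p ++ [c]) = pvPairs p + (p.count c : Int) := by
  induction p with
  | nil => simp [pvPairs]
  | cons x t ih =>
    simp only [List.cons_append, pvPairs, ih, List.count_append, List.count_cons,
      List.count_nil]
    have : (x == c) = (c == x) := by
      by_cases h : x = c <;> simp [h, Ne.symm, eq_comm]
    rw [this]
    push_cast
    ring

-- B's loop invariant: with the dict holding the counter of the already-processed prefix p,
-- running the loop over l adds exactly the pairs contributed by l.
theorem pvBloop (l : List Char) : ∀ (p : List Char) (r : Int),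
    (l.foldl (fun (st : PySem.Dict Char Int × Int) ch =>
        let c := st.1.getD ch 0
        (st.1.insert ch (c + 1), st.2 + c))
      (p.foldl (fun d x => d.insert x (d.getD x 0 + 1)) PySem.Dict.empty, r)).2
      = r + (pvPairs (p ++ l) - pvPairs p) := by
  induction l with
  | nil => intro p r; simp
  | cons c t ih =>
    intro p r
    simp only [List.foldl_cons]
    have hc : (p.foldl (fun d x => d.insert x (d.getD x 0 + 1)) PySem.Dict.empty).getD c 0
        = (p.count c : Int) := by
      rw [PySem.Dict.getD_foldl_insert_add_one]
      simp [PySem.Dict.getD_empty]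
    have hstep : (p.foldl (fun d x => d.insert x (d.getD x 0 + 1)) PySem.Dict.empty).insert c
        ((p.count c : Int) + 1)
        = (p ++ [c]).foldl (fun d x => d.insert x (d.getD x 0 + 1)) PySem.Dict.empty := by
      simp only [List.foldl_append, List.foldl_cons, List.foldl_nil, hc]
    simp only [hc, hstep]
    rw [ih (p ++ [c]) (r + (p.count c : Int))]
    rw [pvPairs_append_singleton]
    simp only [List.append_assoc, List.singleton_append]
    ring

theorem pvB_res (cs : List Char) :
    (cs.foldl (fun (st : PySem.Dict Char Int × Int) ch =>
        let c := st.1.getD ch 0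
        (st.1.insert ch (c + 1), st.2 + c))
      (PySem.Dict.empty, 0)).2 = pvPairs cs := by
  have := pvBloop cs [] 0
  simpa [pvPairs] using this

-- A's inner loop over the suffix, as a list fold, counts the occurrences of val1.
theorem pvInner (l : List Char) (v1 v2 : Char) (r : Int) :
    l.foldl (fun (st2 : Char × Int) e => if v1 == e then (e, st2.2 + 1) else (e, st2.2)) (v2, r)
      = (l.foldl (fun _ e => e) v2, r + l.count v1) := by
  have h : (fun (st2 : Char × Int) e => if v1 == e then (e, st2.2 + 1) else (e, st2.2))
      = (fun (st2 : Char × Int) e => (e, if v1 == e then st2.2 + 1 else st2.2)) := by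
    funext st2 e; by_cases h : v1 == e <;> simp [h]
  rw [h, PySem.List.foldl_prod_mk (f := fun _ e => e)
      (g := fun (acc : Int) e => if v1 == e then acc + 1 else acc),
    PySem.List.foldl_count_if]
  have hcnt : l.countP (fun x => v1 == x) = l.count v1 := by
    rw [List.count_eq_countP]
    apply List.countP_congr
    intro x _
    rcases eq_or_ne v1 x with h | h
    · simp [h]
    · simp [h, h.symm]
  rw [← hcnt]

-- A's outer loop from index a computes the pairs of the suffix cs.drop a.
theorem pvAloop (cs : List Char) : ∀ (n a : Nat), n = cs.length - a →
    ∀ (v1 v2 : Char) (r : Int),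
    ((PySem.List.pyRange (a : Int) (cs.length : Int) 1).foldl
      (fun (st : Char × Char × Int) i =>
        let val1 := PySem.List.pyGetD cs i ' '
        let inner := (PySem.List.pyRange (i + 1) (cs.length : Int) 1).foldl
          (fun (st2 : Char × Int) j =>
            let val2 := PySem.List.pyGetD cs j ' '
            if val1 == val2 then (val2, st2.2 + 1) else (val2, st2.2))
          (st.2.1, st.2.2)
        (val1, inner))
      (v1, v2, r)).2.2 = r + pvPairs (cs.drop a) := by
  intro n
  induction n with
  | zero =>
    intro a ha v1 v2 r
    have hge : cs.length ≤ a := by omega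
    rw [PySem.List.pyRange_one_eq_nil (by exact_mod_cast hge)]
    simp [List.drop_eq_nil_of_le hge, pvPairs]
  | succ n ih =>
    intro a ha v1 v2 r
    have hlt : a < cs.length := by omega
    rw [PySem.List.pyRange_one_cons (by exact_mod_cast hlt)]
    simp only [List.foldl_cons]
    have hget : PySem.List.pyGetD cs (a : Int) ' ' = cs[a] := by
      simp [PySem.List.pyGetD_natCast, List.getElem?_eq_getElem hlt]
    have hcast : ((a : Int) + 1) = ((a + 1 : Nat) : Int) := by push_cast; ring
    rw [hget, hcast]
    have hfold := PySem.List.foldl_pyRange_pyGetD' (a := ((a + 1 : Nat) : Int)) cs ' '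
        (fun (st2 : Char × Int) e => if cs[a] == e then (e, st2.2 + 1) else (e, st2.2))
        (v2, r) (by positivity)
    simp only [Int.toNat_natCast] at hfold
    rw [hfold]
    rw [pvInner]
    rw [ih (a + 1) (by omega)]
    rw [List.drop_eq_getElem_cons hlt]
    simp only [pvPairs]
    ring

-- ===== VERDICT (by name: the statement is the Claim_ definition above) =====
theorem Isogram_Check_spec : Claim_equal_Isogram_Check := by
  intro s _
  unfold Spec_Isogram_Check
  simp only [Isogram_Check, Isogram_Check_alt, PySem.Str.len_eq]
  have hA := pvAloop s.toList s.toList.length 0 (by omega) ' ' ' ' 0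
  simp only [Nat.cast_zero, List.drop_zero, zero_add] at hA
  simp only [hA, pvB_res]
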